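-- pv_equiv track=rewrite | github.com/Dev-SoUni/algorithm | Python/programmers/12987_숫자 게임/solution.py | solution
-- ===== SOURCE A (Python) =====
-- def solution(A, B):
--     A.sort()
--     B.sort()
--     l = len(A)
--     b_start = 0
--     check_list = [0] * l
--
--     for a_val in A:
--         for idx in range(b_start, l):
--             if check_list[idx] == 0 and a_val < B[idx]:
--                 check_list[idx] = 1
--                 b_start = idx
--                 break
--
--     return check_list.count(1)
-- ===== SOURCE B (Python) =====
-- def solution(A, B):
--     # Sorts A and B in place (same observable mutation as the original).
--     A.sort()
--     B.sort()
--     bs = B[:len(A)]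
--     j = 0
--     wins = 0
--     for a in A:
--         while j < len(bs) and bs[j] <= a:
--             j += 1
--         if j < len(bs):
--             wins += 1
--             j += 1
--     return wins
-- ===== Notes on version B (the rewrite author's own statement) =====
-- stated objective: faster
-- what changed: Replaces the per-element inner rescan over a 0/1 check_list with a single two-pointer sweep over the sorted lists (one monotone index into B, no mark array), turning the quadratic nested loops into one linear pass after sorting.
import Mathlib
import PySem

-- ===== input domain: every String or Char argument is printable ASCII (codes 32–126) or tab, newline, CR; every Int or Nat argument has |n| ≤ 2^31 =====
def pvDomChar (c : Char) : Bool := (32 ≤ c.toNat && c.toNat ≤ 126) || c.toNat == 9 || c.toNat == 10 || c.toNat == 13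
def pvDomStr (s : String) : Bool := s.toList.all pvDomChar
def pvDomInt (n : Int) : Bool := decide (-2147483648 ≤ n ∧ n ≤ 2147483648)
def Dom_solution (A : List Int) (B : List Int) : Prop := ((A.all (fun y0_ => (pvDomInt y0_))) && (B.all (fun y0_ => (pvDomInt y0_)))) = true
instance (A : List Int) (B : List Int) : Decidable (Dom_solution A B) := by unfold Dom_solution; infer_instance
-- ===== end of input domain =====

-- B replaces A's quadratic nested scan over a check_list with a sorted two-pointer sweep
-- (asymptotically faster). Both Pythons sort A and B in place; equivalence here is about the
-- return value (B performs the same in-place sorts).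


-- ===== PORT A =====
-- inner loop 'for idx in range(b_start, l): if check_list[idx] == 0 and a_val < B[idx]: … break'
-- returns the first idx in [i, l) satisfying the condition, none if the loop falls through.
-- B[idx] is List.getD: exact under Pre_ (len(A) ≤ len(B), so idx < l is in range for B).
def innerA (Bs : List Int) (a : Int) (check : List Int) (i l : Nat) : Option Nat :=
  if i < l then
    if check.getD i 0 = 0 ∧ a < Bs.getD i 0 then some i
    else innerA Bs a check (i + 1) l
  else none
termination_by l - i

-- one iteration of the outer 'for a_val in A' loop; state = (b_start, check_list)
def stepA (Bs : List Int) (l : Nat) (st : Nat × List Int) (a : Int) : Nat × List Int :=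
  match innerA Bs a st.2 st.1 l with
  | some idx => (idx, st.2.set idx 1)
  | none => st

def solution (A : List Int) (B : List Int) : Int :=
  let As := PySem.List.sorted A id
  let Bs := PySem.List.sorted B id
  let l := As.length
  let fin := As.foldl (stepA Bs l) ((0 : Nat), List.replicate l (0 : Int))
  ((fin.2.count 1 : Nat) : Int)

-- ===== PORT B =====
-- 'while j < len(bs) and bs[j] <= a: j += 1'
def advanceJ (bs : List Int) (a : Int) (j : Nat) : Nat :=
  if j < bs.length ∧ bs.getD j 0 ≤ a then advanceJ bs a (j + 1) else j
termination_by bs.length - j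

-- one iteration of Source B's 'for a in A' loop; state = (j, wins)
def stepB (bs : List Int) (st : Nat × Int) (a : Int) : Nat × Int :=
  let j := advanceJ bs a st.1
  if j < bs.length then (j + 1, st.2 + 1) else (j, st.2)

def solution_alt (A : List Int) (B : List Int) : Int :=
  let As := PySem.List.sorted A id
  let bs := (PySem.List.sorted B id).take A.length  -- B[:len(A)]: nonnegative slice = take
  (As.foldl (stepB bs) ((0 : Nat), (0 : Int))).2

-- ===== PRECONDITION & SPEC =====
-- Pre_ excludes exactly the inputs where A raises IndexError: whenever len(B) < len(A) the
-- inner scan reaches B[len(B)] (see Raises_ below); A returns normally iff len(A) ≤ len(B).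
def Pre_solution (A : List Int) (B : List Int) : Prop := A.length ≤ B.length
instance (A : List Int) (B : List Int) : Decidable (Pre_solution A B) := by
  unfold Pre_solution; infer_instance

def pvWitness_solution : List Int × List Int := ([5, 1, 3], [2, 6, 4])

def Spec_solution (A : List Int) (B : List Int) (out : Int) : Prop := out = solution_alt A B
instance (A : List Int) (B : List Int) (out : Int) : Decidable (Spec_solution A B out) := by
  unfold Spec_solution; infer_instance

-- ===== CLAIM (what is proved, stated in full; the proofs are below) =====
def Claim_equal_solution : Prop := ∀ (A : List Int) (B : List Int), Dom_solution A B → Pre_solution A B → Spec_solution A B (solution A B)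

-- ===== LEMMAS AND PROOFS =====

-- advanceJ basic facts
theorem advanceJ_ge (bs : List Int) (a : Int) (j : Nat) : j ≤ advanceJ bs a j := by
  fun_induction advanceJ with
  | case1 j h ih => omega
  | case2 j h => omega

theorem advanceJ_le (bs : List Int) (a : Int) (j : Nat) (h : j ≤ bs.length) :
    advanceJ bs a j ≤ bs.length := by
  fun_induction advanceJ with
  | case1 j h2 ih => exact ih (by omega)
  | case2 j h2 => omega

theorem advanceJ_mid (bs : List Int) (a : Int) (j : Nat) :
    ∀ idx, j ≤ idx → idx < advanceJ bs a j → bs.getD idx 0 ≤ a := by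
  fun_induction advanceJ with
  | case1 j h ih =>
      intro idx h1 h2
      rcases Nat.eq_or_lt_of_le h1 with rfl | h3
      · exact h.2
      · exact ih idx h3 h2
  | case2 j h => intro idx h1 h2; omega


theorem innerA_step (Bs : List Int) (a : Int) (check : List Int) (l j : Nat)
    (h : ¬(check.getD j 0 = 0 ∧ a < Bs.getD j 0)) :
    innerA Bs a check j l = innerA Bs a check (j + 1) l := by
  rw [innerA]
  by_cases hj : j < l
  · rw [if_pos hj, if_neg h]
  · rw [innerA]; rw [if_neg hj, if_neg (show ¬ j + 1 < l by omega)]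

theorem innerA_skip (Bs : List Int) (a : Int) (check : List Int) (l : Nat) :
    ∀ j i, i ≤ j →
      (∀ idx, i ≤ idx → idx < j → ¬(check.getD idx 0 = 0 ∧ a < Bs.getD idx 0)) →
      innerA Bs a check i l = innerA Bs a check j l := by
  intro j
  induction j with
  | zero => intro i hi _; rw [Nat.le_zero.mp hi]
  | succ j ih =>
      intro i hi H
      rcases Nat.eq_or_lt_of_le hi with rfl | hlt
      · rfl
      · have h1 : innerA Bs a check i l = innerA Bs a check j l :=
          ih i (by omega) (fun idx h1 h2 => H idx h1 (by omega))
        rw [h1, innerA_step Bs a check l j (H j (by omega) (by omega))]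

theorem innerA_scan (Bs bs : List Int) (a : Int) (check : List Int) (l : Nat)
    (hbl : bs.length = l) (hbg : ∀ idx, idx < l → bs.getD idx 0 = Bs.getD idx 0) :
    ∀ j, (∀ idx, j ≤ idx → check.getD idx 0 = 0) →
      innerA Bs a check j l =
        (if advanceJ bs a j < l then some (advanceJ bs a j) else none) := by
  intro j
  fun_induction advanceJ bs a j with
  | case1 j h ih =>
      intro h0
      rw [innerA]
      have hjl : j < l := by omega
      have : ¬ a < Bs.getD j 0 := by rw [← hbg j hjl]; omega
      simp only [if_pos hjl, this, and_false, if_false]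
      exact ih (fun idx hi => h0 idx (by omega))
  | case2 j h =>
      intro h0
      rw [innerA]
      by_cases hjl : j < l
      · have hb : bs.getD j 0 ≤ a → False := fun hle => h ⟨by omega, hle⟩
        have ha : a < Bs.getD j 0 := by
          have := hbg j hjl
          by_contra hc; exact hb (by omega)
        rw [if_pos hjl, if_pos ⟨h0 j (le_refl j), ha⟩, if_pos hjl]
      · rw [if_neg hjl, if_neg hjl]

theorem getD_set_ne (check : List Int) (k idx : Nat) (v : Int) (h : idx ≠ k) :
    (check.set k v).getD idx 0 = check.getD idx 0 := by
  simp [List.getD, List.getElem?_set_ne (Ne.symm h)]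

theorem count_set_one (check : List Int) : ∀ k, k < check.length → check.getD k 0 = 0 →
    (check.set k 1).count 1 = check.count 1 + 1 := by
  induction check with
  | nil => intro k h; simp at h
  | cons c cs ih =>
      intro k hk h0
      cases k with
      | zero =>
          simp [List.getD] at h0
          simp [h0]
      | succ k =>
          simp [List.getD] at h0
          simp only [List.set, List.count_cons]
          rw [ih k (by simpa using hk) (by simpa [List.getD] using h0)]
          omega

-- the main loop invariant: A's fold over (b_start, check_list) and B's fold over (j, wins)
theorem main_inv (Bs bs : List Int) (l : Nat)
    (hbl : bs.length = l) (hbg : ∀ idx, idx < l → bs.getD idx 0 = Bs.getD idx 0) :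
    ∀ (rest : List Int), rest.Pairwise (· ≤ ·) →
    ∀ (b j : Nat) (check : List Int) (w : Int),
      b ≤ j → j ≤ l → check.length = l →
      (∀ idx, j ≤ idx → check.getD idx 0 = 0) →
      (∀ idx, idx < j → check.getD idx 0 = 0 → ∀ a ∈ rest, Bs.getD idx 0 ≤ a) →
      w = (check.count 1 : Int) →
      (((rest.foldl (stepA Bs l) (b, check)).2.count 1 : Nat) : Int)
        = (rest.foldl (stepB bs) (j, w)).2 := by
  intro rest
  induction rest with
  | nil =>
      intro _ b j check w _ _ _ _ _ hw
      simpa using hw.symm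
  | cons a as ih =>
      intro hp b j check w hbj hjl hcl h0 hrej hw
      obtain ⟨ha, hpas⟩ := List.pairwise_cons.mp hp
      simp only [List.foldl_cons]
      have hskip : innerA Bs a check b l = innerA Bs a check j l := by
        apply innerA_skip Bs a check l j b hbj
        intro idx h1 h2 hc
        exact absurd hc.2 (not_lt.mpr (hrej idx h2 hc.1 a List.mem_cons_self))
      have hscan := innerA_scan Bs bs a check l hbl hbg j h0
      have hkj : j ≤ advanceJ bs a j := advanceJ_ge bs a j
      have hkl : advanceJ bs a j ≤ l := by
        have := advanceJ_le bs a j (by omega)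
        omega
      have hmid : ∀ idx, j ≤ idx → idx < advanceJ bs a j → Bs.getD idx 0 ≤ a := by
        intro idx h1 h2
        rw [← hbg idx (by omega)]
        exact advanceJ_mid bs a j idx h1 h2
      by_cases hklt : advanceJ bs a j < l
      · -- a_val wins: A marks index k = advanceJ bs a j, B counts it and moves past it
        have hck : check.getD (advanceJ bs a j) 0 = 0 := h0 _ hkj
        have hstepA : stepA Bs l (b, check) a = (advanceJ bs a j, check.set (advanceJ bs a j) 1) := by
          unfold stepA
          simp only [hskip, hscan, if_pos hklt]
        have hstepB : stepB bs (j, w) a = (advanceJ bs a j + 1, w + 1) := by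
          unfold stepB
          simp only [if_pos (show advanceJ bs a j < bs.length by omega)]
        rw [hstepA, hstepB]
        apply ih hpas _ _ _ _ (by omega) (by omega) (by simp [hcl])
        · intro idx hi
          rw [getD_set_ne check _ idx 1 (by omega)]
          exact h0 idx (by omega)
        · intro idx hi hc a' ha'
          by_cases hik : idx = advanceJ bs a j
          · exfalso
            rw [hik] at hc
            have : (check.set (advanceJ bs a j) 1).getD (advanceJ bs a j) 0 = 1 := by
              have hlen : advanceJ bs a j < check.length := by omega
              simp [List.getD, List.getElem?_set_self hlen]
            omega
          · rw [getD_set_ne check _ idx 1 hik] at hc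
            by_cases hij : idx < j
            · exact hrej idx hij hc a' (List.mem_cons_of_mem a ha')
            · exact le_trans (hmid idx (by omega) (by omega)) (ha a' ha')
        · rw [hw]
          rw [count_set_one check (advanceJ bs a j) (by omega) hck]
          push_cast
          ring
      · -- a_val finds no opponent: A leaves the state, B's pointer is exhausted
        have hstepA : stepA Bs l (b, check) a = (b, check) := by
          unfold stepA
          simp only [hskip, hscan, if_neg hklt]
        have hstepB : stepB bs (j, w) a = (advanceJ bs a j, w) := by
          unfold stepB
          simp only [if_neg (show ¬ advanceJ bs a j < bs.length by omega)]
        rw [hstepA, hstepB]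
        apply ih hpas _ _ _ _ (by omega) (by omega) hcl
        · intro idx hi
          exact h0 idx (by omega)
        · intro idx hi hc a' ha'
          by_cases hij : idx < j
          · exact hrej idx hij hc a' (List.mem_cons_of_mem a ha')
          · exact le_trans (hmid idx (by omega) (by omega)) (ha a' ha')
        · exact hw

-- ===== VERDICT (by name: the statement is the Claim_ definition above) =====
theorem solution_spec : Claim_equal_solution := by
  intro A B _ hp
  have hp' : A.length ≤ B.length := hp
  unfold Spec_solution solution solution_alt
  simp only []
  have hAlen : (PySem.List.sorted A id).length = A.length := PySem.List.length_sorted A id false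
  have hBlen : (PySem.List.sorted B id).length = B.length := PySem.List.length_sorted B id false
  have hpA : (PySem.List.sorted A id).Pairwise (· ≤ ·) := by
    simpa using PySem.List.sorted_pairwise A id
  rw [hAlen]
  apply main_inv (PySem.List.sorted B id) ((PySem.List.sorted B id).take A.length) A.length
    (by rw [List.length_take, hBlen]; omega)
    (fun idx h => by simp [List.getD, h])
    (PySem.List.sorted A id) hpA 0 0 (List.replicate A.length 0) 0
    (le_refl 0) (by omega) (by simp)
    (fun idx _ => by simp [List.getD])
    (fun idx h => by omega)
    (by simp [List.count_replicate])
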